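-- pv_equiv track=rewrite | github.com/MrBrantCode/unitest_baseline | mut_generate/mist_train_cf/cf_95634/solution.py | count_quadruples
-- ===== SOURCE A (Python) =====
-- def count_quadruples(arr):
--     count = 0
--
--     for i in range(len(arr)-3):
--         for j in range(i+1, len(arr)-2):
--             for k in range(j+1, len(arr)-1):
--                 for l in range(k+1, len(arr)):
--                     if arr[i] != arr[j] != arr[k] != arr[l]:
--                         if arr[i] + arr[j] + arr[k] + arr[l] == 0:
--                             count += 1
--
--     return count
-- ===== SOURCE B (Python) =====
-- def count_quadruples(arr):
--     # O(n^3): loop over the last index k of the middle triple (i, j, k) and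
--     # count the fourth element l via a running counter of the suffix arr[k+1:],
--     # instead of A's fourth nested loop.
--     n = len(arr)
--     suffix = {}
--     for v in arr:
--         suffix[v] = suffix.get(v, 0) + 1
--     count = 0
--     for k in range(n):
--         ak = arr[k]
--         suffix[ak] = suffix.get(ak, 0) - 1
--         for j in range(k):
--             if arr[j] != ak:
--                 for i in range(j):
--                     if arr[i] != arr[j]:
--                         t = -(arr[i] + arr[j] + ak)
--                         if t != ak:
--                             count += suffix.get(t, 0)
--     return count
-- ===== Notes on version B (the rewrite author's own statement) =====
-- stated objective: faster
-- what changed: B removes A's fourth nested loop: it loops over triples (i,j,k) with k outermost and counts the fourth element via O(1) lookups in a running counter of the suffix arr[k+1:], built once and decremented as k advances.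
import Mathlib
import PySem

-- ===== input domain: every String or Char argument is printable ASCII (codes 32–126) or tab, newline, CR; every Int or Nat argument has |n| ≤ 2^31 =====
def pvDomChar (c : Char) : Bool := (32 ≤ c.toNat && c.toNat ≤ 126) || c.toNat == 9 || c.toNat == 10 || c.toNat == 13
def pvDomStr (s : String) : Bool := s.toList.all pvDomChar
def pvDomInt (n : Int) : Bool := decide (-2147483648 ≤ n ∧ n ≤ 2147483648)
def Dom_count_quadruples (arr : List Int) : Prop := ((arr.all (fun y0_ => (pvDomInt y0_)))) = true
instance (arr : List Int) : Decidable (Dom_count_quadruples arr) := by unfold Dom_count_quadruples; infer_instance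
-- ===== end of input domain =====

-- B replaces A's fourth nested loop by O(1) lookups in a running counter of the suffix
-- arr[k+1:], looping over (i,j,k) with k outermost: O(n^3) instead of O(n^4).

-- ===== PORT A =====
def count_quadruples (arr : List Int) : Int :=
  (PySem.List.pyRange 0 ((arr.length : Int) - 3) 1).foldl (fun count i =>
    (PySem.List.pyRange (i + 1) ((arr.length : Int) - 2) 1).foldl (fun count j =>
      (PySem.List.pyRange (j + 1) ((arr.length : Int) - 1) 1).foldl (fun count k =>
        (PySem.List.pyRange (k + 1) (arr.length : Int) 1).foldl (fun count l =>
          if PySem.List.pyGetD arr i 0 ≠ PySem.List.pyGetD arr j 0 ∧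
             PySem.List.pyGetD arr j 0 ≠ PySem.List.pyGetD arr k 0 ∧
             PySem.List.pyGetD arr k 0 ≠ PySem.List.pyGetD arr l 0 then
            if PySem.List.pyGetD arr i 0 + PySem.List.pyGetD arr j 0 +
               PySem.List.pyGetD arr k 0 + PySem.List.pyGetD arr l 0 = 0 then
              count + 1
            else count
          else count) count) count) count) 0

-- ===== PORT B =====
def count_quadruples_alt (arr : List Int) : Int :=
  let suffix0 : PySem.Dict Int Int :=
    arr.foldl (fun d v => d.modify v 0 (· + 1)) PySem.Dict.empty
  ((PySem.List.pyRange 0 (arr.length : Int) 1).foldl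
    (fun (st : PySem.Dict Int Int × Int) k =>
      let ak := PySem.List.pyGetD arr k 0
      let d := st.1.modify ak 0 (· - 1)
      let cnt := (PySem.List.pyRange 0 k 1).foldl (fun cnt j =>
          if PySem.List.pyGetD arr j 0 ≠ ak then
            (PySem.List.pyRange 0 j 1).foldl (fun cnt i =>
                if PySem.List.pyGetD arr i 0 ≠ PySem.List.pyGetD arr j 0 then
                  if -(PySem.List.pyGetD arr i 0 + PySem.List.pyGetD arr j 0 + ak) ≠ ak then
                    cnt + d.getD (-(PySem.List.pyGetD arr i 0 + PySem.List.pyGetD arr j 0 + ak)) 0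
                  else cnt
                else cnt) cnt
          else cnt) st.2
      (d, cnt)) (suffix0, 0)).2

-- ===== PRECONDITION & SPEC =====
def Spec_count_quadruples (arr : List Int) (out : Int) : Prop := out = count_quadruples_alt arr
instance (arr : List Int) (out : Int) : Decidable (Spec_count_quadruples arr out) := by unfold Spec_count_quadruples; infer_instance

-- ===== CLAIM (what is proved, stated in full; the proofs are below) =====
def Claim_equal_count_quadruples : Prop := ∀ (arr : List Int), Dom_count_quadruples arr → Spec_count_quadruples arr (count_quadruples arr)

-- ===== LEMMAS AND PROOFS =====

-- the common summand: for a triple i<j<k meeting the chained-≠ tests, the number of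
-- valid completions l > k, written as a count over the suffix arr[k+1:]
def pvF (arr : List Int) (i j k : Int) : Int :=
  if PySem.List.pyGetD arr i 0 ≠ PySem.List.pyGetD arr j 0 ∧
     PySem.List.pyGetD arr j 0 ≠ PySem.List.pyGetD arr k 0 ∧
     -(PySem.List.pyGetD arr i 0 + PySem.List.pyGetD arr j 0 + PySem.List.pyGetD arr k 0)
       ≠ PySem.List.pyGetD arr k 0 then
    ((arr.drop (k + 1).toNat).count
      (-(PySem.List.pyGetD arr i 0 + PySem.List.pyGetD arr j 0 + PySem.List.pyGetD arr k 0)) : Int)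
  else 0

def pvS (a b : Int) (f : Int → Int) : Int := ((PySem.List.pyRange a b 1).map f).sum

lemma pv_foldl_sum {α : Type} (l : List α) (f : Int → α → Int) (g : α → Int) (c : Int)
    (h : ∀ c x, x ∈ l → f c x = c + g x) : l.foldl f c = c + (l.map g).sum := by
  rw [PySem.List.foldl_congr_mem l f (fun c x => c + g x) c (by intro acc x hx; exact h acc x hx)]
  exact PySem.List.foldl_add l g c

lemma pvS_zero (a b : Int) (f : Int → Int) (h : ∀ x, a ≤ x → x < b → f x = 0) :
    pvS a b f = 0 := by
  apply List.sum_eq_zero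
  intro y hy
  rcases List.mem_map.mp hy with ⟨x, hx, rfl⟩
  rw [PySem.List.mem_pyRange_one] at hx
  exact h x hx.1 hx.2

lemma pvS_cons (a b : Int) (f : Int → Int) (h : a < b) :
    pvS a b f = f a + pvS (a + 1) b f := by
  rw [pvS, PySem.List.pyRange_one_cons h, List.map_cons, List.sum_cons, pvS]

lemma pv_sum_extend (a b' b : Int) (f : Int → Int) (hb : b' ≤ b)
    (h0 : ∀ x, b' ≤ x → x < b → f x = 0) : pvS a b f = pvS a b' f := by
  by_cases hab : a ≤ b'
  · rw [pvS, pvS, PySem.List.pyRange_one_append a b' b hab hb, List.map_append, List.sum_append]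
    have hz : ((PySem.List.pyRange b' b 1).map f).sum = 0 := by
      apply List.sum_eq_zero
      intro y hy
      rcases List.mem_map.mp hy with ⟨x, hx, rfl⟩
      rw [PySem.List.mem_pyRange_one] at hx
      exact h0 x hx.1 hx.2
    rw [hz, add_zero]
  · rw [pvS, pvS, PySem.List.pyRange_one_eq_nil (by omega : b' ≤ a), List.map_nil, List.sum_nil]
    apply List.sum_eq_zero
    intro y hy
    rcases List.mem_map.mp hy with ⟨x, hx, rfl⟩
    rw [PySem.List.mem_pyRange_one] at hx
    exact h0 x (by omega) hx.2

lemma pvF_hi (arr : List Int) (i j k : Int) (h : (arr.length : Int) - 1 ≤ k) :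
    pvF arr i j k = 0 := by
  have hd : arr.drop (k + 1).toNat = [] := by
    apply List.drop_eq_nil_of_le
    omega
  rw [pvF, hd]
  simp

-- ---- A reduced to a nested triangular sum of pvF ----

lemma pv_lfold (arr : List Int) (i j k c : Int) (hk : 0 ≤ k) :
    (PySem.List.pyRange (k + 1) (arr.length : Int) 1).foldl (fun count l =>
      if PySem.List.pyGetD arr i 0 ≠ PySem.List.pyGetD arr j 0 ∧
         PySem.List.pyGetD arr j 0 ≠ PySem.List.pyGetD arr k 0 ∧
         PySem.List.pyGetD arr k 0 ≠ PySem.List.pyGetD arr l 0 then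
        if PySem.List.pyGetD arr i 0 + PySem.List.pyGetD arr j 0 +
           PySem.List.pyGetD arr k 0 + PySem.List.pyGetD arr l 0 = 0 then
          count + 1
        else count
      else count) c = c + pvF arr i j k := by
  have hstep : (PySem.List.pyRange (k + 1) (arr.length : Int) 1).foldl (fun count l =>
      if PySem.List.pyGetD arr i 0 ≠ PySem.List.pyGetD arr j 0 ∧
         PySem.List.pyGetD arr j 0 ≠ PySem.List.pyGetD arr k 0 ∧
         PySem.List.pyGetD arr k 0 ≠ PySem.List.pyGetD arr l 0 then
        if PySem.List.pyGetD arr i 0 + PySem.List.pyGetD arr j 0 +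
           PySem.List.pyGetD arr k 0 + PySem.List.pyGetD arr l 0 = 0 then
          count + 1
        else count
      else count) c =
      (arr.drop (k + 1).toNat).foldl (fun count x =>
        if PySem.List.pyGetD arr i 0 ≠ PySem.List.pyGetD arr j 0 ∧
           PySem.List.pyGetD arr j 0 ≠ PySem.List.pyGetD arr k 0 ∧
           PySem.List.pyGetD arr k 0 ≠ x then
          if PySem.List.pyGetD arr i 0 + PySem.List.pyGetD arr j 0 +
             PySem.List.pyGetD arr k 0 + x = 0 then
            count + 1
          else count
        else count) c :=
    PySem.List.foldl_pyRange_pyGetD' arr 0 (fun count x =>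
        if PySem.List.pyGetD arr i 0 ≠ PySem.List.pyGetD arr j 0 ∧
           PySem.List.pyGetD arr j 0 ≠ PySem.List.pyGetD arr k 0 ∧
           PySem.List.pyGetD arr k 0 ≠ x then
          if PySem.List.pyGetD arr i 0 + PySem.List.pyGetD arr j 0 +
             PySem.List.pyGetD arr k 0 + x = 0 then
            count + 1
          else count
        else count) c (a := k + 1) (by omega)
  rw [hstep]
  by_cases h1 : PySem.List.pyGetD arr i 0 ≠ PySem.List.pyGetD arr j 0 ∧
      PySem.List.pyGetD arr j 0 ≠ PySem.List.pyGetD arr k 0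
  · by_cases h2 : -(PySem.List.pyGetD arr i 0 + PySem.List.pyGetD arr j 0 +
        PySem.List.pyGetD arr k 0) = PySem.List.pyGetD arr k 0
    · have hid : (arr.drop (k + 1).toNat).foldl (fun count x =>
          if PySem.List.pyGetD arr i 0 ≠ PySem.List.pyGetD arr j 0 ∧
             PySem.List.pyGetD arr j 0 ≠ PySem.List.pyGetD arr k 0 ∧
             PySem.List.pyGetD arr k 0 ≠ x then
            if PySem.List.pyGetD arr i 0 + PySem.List.pyGetD arr j 0 +
               PySem.List.pyGetD arr k 0 + x = 0 then
              count + 1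
            else count
          else count) c = (arr.drop (k + 1).toNat).foldl (fun count _ => count) c := by
        apply PySem.List.foldl_congr_mem
        intro acc x _
        split_ifs with ha hb
        · exfalso; omega
        · rfl
        · rfl
      rw [hid, PySem.List.foldl_ignore, pvF, if_neg (by tauto), add_zero]
    · have hidx : (arr.drop (k + 1).toNat).foldl (fun count x =>
          if PySem.List.pyGetD arr i 0 ≠ PySem.List.pyGetD arr j 0 ∧
             PySem.List.pyGetD arr j 0 ≠ PySem.List.pyGetD arr k 0 ∧
             PySem.List.pyGetD arr k 0 ≠ x then
            if PySem.List.pyGetD arr i 0 + PySem.List.pyGetD arr j 0 +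
               PySem.List.pyGetD arr k 0 + x = 0 then
              count + 1
            else count
          else count) c = (arr.drop (k + 1).toNat).foldl (fun count x =>
            if x == -(PySem.List.pyGetD arr i 0 + PySem.List.pyGetD arr j 0 +
               PySem.List.pyGetD arr k 0) then count + 1 else count) c := by
        apply PySem.List.foldl_congr_mem
        intro acc x _
        by_cases hx : x = -(PySem.List.pyGetD arr i 0 + PySem.List.pyGetD arr j 0 +
            PySem.List.pyGetD arr k 0)
        · have hk' : PySem.List.pyGetD arr k 0 ≠ x := by omega
          rw [if_pos ⟨h1.1, h1.2, hk'⟩, if_pos (by omega), if_pos (by simp [hx])]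
        · have hbeq : (x == -(PySem.List.pyGetD arr i 0 + PySem.List.pyGetD arr j 0 +
              PySem.List.pyGetD arr k 0)) = false := beq_eq_false_iff_ne.mpr hx
          rw [hbeq, if_neg (show ¬(false = true) by simp)]
          split_ifs with ha hs <;> omega
      rw [hidx, PySem.List.foldl_beq_add_one, pvF, if_pos ⟨h1.1, h1.2, h2⟩]
  · have hid : (arr.drop (k + 1).toNat).foldl (fun count x =>
        if PySem.List.pyGetD arr i 0 ≠ PySem.List.pyGetD arr j 0 ∧
           PySem.List.pyGetD arr j 0 ≠ PySem.List.pyGetD arr k 0 ∧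
           PySem.List.pyGetD arr k 0 ≠ x then
          if PySem.List.pyGetD arr i 0 + PySem.List.pyGetD arr j 0 +
             PySem.List.pyGetD arr k 0 + x = 0 then
            count + 1
          else count
        else count) c = (arr.drop (k + 1).toNat).foldl (fun count _ => count) c := by
      apply PySem.List.foldl_congr_mem
      intro acc x _
      split_ifs with ha hb
      · exact absurd ⟨ha.1, ha.2.1⟩ h1
      · rfl
      · rfl
    rw [hid, PySem.List.foldl_ignore, pvF, if_neg (by tauto), add_zero]

lemma pv_kfold (arr : List Int) (i j c : Int) (hj : 0 ≤ j) :
    (PySem.List.pyRange (j + 1) ((arr.length : Int) - 1) 1).foldl (fun count k =>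
      (PySem.List.pyRange (k + 1) (arr.length : Int) 1).foldl (fun count l =>
        if PySem.List.pyGetD arr i 0 ≠ PySem.List.pyGetD arr j 0 ∧
           PySem.List.pyGetD arr j 0 ≠ PySem.List.pyGetD arr k 0 ∧
           PySem.List.pyGetD arr k 0 ≠ PySem.List.pyGetD arr l 0 then
          if PySem.List.pyGetD arr i 0 + PySem.List.pyGetD arr j 0 +
             PySem.List.pyGetD arr k 0 + PySem.List.pyGetD arr l 0 = 0 then
            count + 1
          else count
        else count) count) c
    = c + pvS (j + 1) (arr.length : Int) (fun k => pvF arr i j k) := by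
  rw [pv_foldl_sum _ _ (fun k => pvF arr i j k) c (by
    intro c k hk
    rw [PySem.List.mem_pyRange_one] at hk
    exact pv_lfold arr i j k c (by omega))]
  rw [← pvS]
  rw [pv_sum_extend (j + 1) ((arr.length : Int) - 1) (arr.length : Int)
      (fun k => pvF arr i j k) (by omega) (fun x hx _ => pvF_hi arr i j x hx)]

lemma pv_jfold (arr : List Int) (i c : Int) (hi : 0 ≤ i) :
    (PySem.List.pyRange (i + 1) ((arr.length : Int) - 2) 1).foldl (fun count j =>
      (PySem.List.pyRange (j + 1) ((arr.length : Int) - 1) 1).foldl (fun count k =>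
        (PySem.List.pyRange (k + 1) (arr.length : Int) 1).foldl (fun count l =>
          if PySem.List.pyGetD arr i 0 ≠ PySem.List.pyGetD arr j 0 ∧
             PySem.List.pyGetD arr j 0 ≠ PySem.List.pyGetD arr k 0 ∧
             PySem.List.pyGetD arr k 0 ≠ PySem.List.pyGetD arr l 0 then
            if PySem.List.pyGetD arr i 0 + PySem.List.pyGetD arr j 0 +
               PySem.List.pyGetD arr k 0 + PySem.List.pyGetD arr l 0 = 0 then
              count + 1
            else count
          else count) count) count) c
    = c + pvS (i + 1) (arr.length : Int) (fun j => pvS (j + 1) (arr.length : Int) (fun k => pvF arr i j k)) := by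
  rw [pv_foldl_sum _ _ (fun j => pvS (j + 1) (arr.length : Int) (fun k => pvF arr i j k)) c (by
    intro c j hj
    rw [PySem.List.mem_pyRange_one] at hj
    exact pv_kfold arr i j c (by omega))]
  rw [← pvS]
  rw [pv_sum_extend (i + 1) ((arr.length : Int) - 2) (arr.length : Int) _ (by omega) (by
    intro x hx _
    exact pvS_zero _ _ _ (fun y hy _ => pvF_hi arr i x y (by omega)))]

lemma pv_A_eq (arr : List Int) :
    count_quadruples arr
    = pvS 0 (arr.length : Int) (fun i => pvS (i + 1) (arr.length : Int)
        (fun j => pvS (j + 1) (arr.length : Int) (fun k => pvF arr i j k))) := by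
  rw [count_quadruples]
  rw [pv_foldl_sum _ _ (fun i => pvS (i + 1) (arr.length : Int)
      (fun j => pvS (j + 1) (arr.length : Int) (fun k => pvF arr i j k))) 0 (by
    intro c i hi
    rw [PySem.List.mem_pyRange_one] at hi
    exact pv_jfold arr i c (by omega))]
  rw [← pvS, zero_add]
  rw [pv_sum_extend 0 ((arr.length : Int) - 3) (arr.length : Int) _ (by omega) (by
    intro x hx _
    exact pvS_zero _ _ _ (fun y hy _ =>
      pvS_zero _ _ _ (fun z hz _ => pvF_hi arr x y z (by omega))))]

-- ---- B reduced to the k-outermost nested triangular sum of pvF ----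

lemma pv_b_jfold (arr : List Int) (k : Int) (d : PySem.Dict Int Int) (c : Int)
    (hd : ∀ t, d.getD t 0 = ((arr.drop (k + 1).toNat).count t : Int)) :
    (PySem.List.pyRange 0 k 1).foldl (fun cnt j =>
      if PySem.List.pyGetD arr j 0 ≠ PySem.List.pyGetD arr k 0 then
        (PySem.List.pyRange 0 j 1).foldl (fun cnt i =>
            if PySem.List.pyGetD arr i 0 ≠ PySem.List.pyGetD arr j 0 then
              if -(PySem.List.pyGetD arr i 0 + PySem.List.pyGetD arr j 0 +
                    PySem.List.pyGetD arr k 0) ≠ PySem.List.pyGetD arr k 0 then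
                cnt + d.getD (-(PySem.List.pyGetD arr i 0 + PySem.List.pyGetD arr j 0 +
                    PySem.List.pyGetD arr k 0)) 0
              else cnt
            else cnt) cnt
      else cnt) c
    = c + pvS 0 k (fun j => pvS 0 j (fun i => pvF arr i j k)) := by
  rw [pv_foldl_sum _ _ (fun j => pvS 0 j (fun i => pvF arr i j k)) c (by
    intro c j _
    by_cases hcj : PySem.List.pyGetD arr j 0 ≠ PySem.List.pyGetD arr k 0
    · rw [if_pos hcj]
      rw [pv_foldl_sum _ _ (fun i => pvF arr i j k) c (by
        intro c i _
        beta_reduce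
        rw [pvF]
        by_cases ha : PySem.List.pyGetD arr i 0 ≠ PySem.List.pyGetD arr j 0
        · by_cases hc : -(PySem.List.pyGetD arr i 0 + PySem.List.pyGetD arr j 0 +
              PySem.List.pyGetD arr k 0) ≠ PySem.List.pyGetD arr k 0
          · rw [if_pos ha, if_pos hc, if_pos ⟨ha, hcj, hc⟩, hd]
          · rw [if_pos ha, if_neg hc, if_neg (by tauto)]
            omega
        · rw [if_neg ha, if_neg (by tauto)]
          omega)]
      rw [← pvS]
    · rw [if_neg hcj]
      have h0 : pvS 0 j (fun i => pvF arr i j k) = 0 :=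
        pvS_zero _ _ _ (fun x _ _ => by rw [pvF, if_neg (by tauto)])
      show c = c + pvS 0 j (fun i => pvF arr i j k)
      rw [h0, add_zero])]
  rw [← pvS]

lemma pv_b_kfold (arr : List Int) (fuel : Nat) : ∀ (m : Int) (d : PySem.Dict Int Int) (c : Int),
    0 ≤ m → fuel = ((arr.length : Int) - m).toNat →
    (∀ t, d.getD t 0 = ((arr.drop m.toNat).count t : Int)) →
    ((PySem.List.pyRange m (arr.length : Int) 1).foldl
      (fun (st : PySem.Dict Int Int × Int) k =>
        let ak := PySem.List.pyGetD arr k 0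
        let d := st.1.modify ak 0 (· - 1)
        let cnt := (PySem.List.pyRange 0 k 1).foldl (fun cnt j =>
            if PySem.List.pyGetD arr j 0 ≠ ak then
              (PySem.List.pyRange 0 j 1).foldl (fun cnt i =>
                  if PySem.List.pyGetD arr i 0 ≠ PySem.List.pyGetD arr j 0 then
                    if -(PySem.List.pyGetD arr i 0 + PySem.List.pyGetD arr j 0 + ak) ≠ ak then
                      cnt + d.getD (-(PySem.List.pyGetD arr i 0 + PySem.List.pyGetD arr j 0 + ak)) 0
                    else cnt
                  else cnt) cnt
            else cnt) st.2
        (d, cnt)) (d, c)).2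
    = c + pvS m (arr.length : Int)
        (fun k => pvS 0 k (fun j => pvS 0 j (fun i => pvF arr i j k))) := by
  induction fuel with
  | zero =>
    intro m d c hm hf hd
    have hnm : (arr.length : Int) ≤ m := by omega
    rw [PySem.List.pyRange_one_eq_nil hnm, List.foldl_nil, pvS,
      PySem.List.pyRange_one_eq_nil hnm, List.map_nil, List.sum_nil, add_zero]
  | succ f ih =>
    intro m d c hm hf hd
    have hmn : m < (arr.length : Int) := by omega
    have hidx : m.toNat < arr.length := by omega
    have hak : PySem.List.pyGetD arr m 0 = arr[m.toNat] := by
      rw [PySem.List.pyGetD_of_nonneg arr 0 hm]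
      exact List.getD_eq_getElem arr 0 hidx
    have hdrop : arr.drop m.toNat = arr[m.toNat] :: arr.drop (m.toNat + 1) :=
      List.drop_eq_getElem_cons hidx
    have htn : (m + 1).toNat = m.toNat + 1 := by omega
    have hd' : ∀ t, ((d.modify (PySem.List.pyGetD arr m 0) 0 (· - 1)).getD t 0)
        = ((arr.drop (m + 1).toNat).count t : Int) := by
      intro t
      rw [PySem.Dict.getD_modify, htn]
      by_cases ht : t = PySem.List.pyGetD arr m 0
      · rw [if_pos ht, hd, ht, hak]
        have : (arr.drop m.toNat).count arr[m.toNat]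
            = (arr.drop (m.toNat + 1)).count arr[m.toNat] + 1 := by
          rw [hdrop, List.count_cons]
          simp
        rw [this]
        push_cast
        ring
      · rw [if_neg ht, hd]
        have hcc : (arr.drop m.toNat).count t = (arr.drop (m.toNat + 1)).count t := by
          rw [hdrop, List.count_cons]
          rw [hak] at ht
          have hne : (arr[m.toNat] == t) = false := by
            simp only [beq_eq_false_iff_ne, ne_eq]
            intro hh
            exact ht hh.symm
          rw [hne]
          simp
        rw [hcc]
    rw [PySem.List.pyRange_one_cons hmn, List.foldl_cons]
    show ((PySem.List.pyRange (m + 1) (arr.length : Int) 1).foldl _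
      (d.modify (PySem.List.pyGetD arr m 0) 0 (· - 1), _)).2 = _
    rw [ih (m + 1) (d.modify (PySem.List.pyGetD arr m 0) 0 (· - 1)) _ (by omega) (by omega) hd']
    rw [pv_b_jfold arr m (d.modify (PySem.List.pyGetD arr m 0) 0 (· - 1)) c hd']
    rw [pvS_cons m (arr.length : Int) _ hmn]
    ring

lemma pv_B_eq (arr : List Int) :
    count_quadruples_alt arr
    = pvS 0 (arr.length : Int) (fun k => pvS 0 k
        (fun j => pvS 0 j (fun i => pvF arr i j k))) := by
  rw [count_quadruples_alt]
  rw [pv_b_kfold arr ((arr.length : Int) - 0).toNat 0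
      (arr.foldl (fun d v => d.modify v 0 (· + 1)) PySem.Dict.empty) 0 le_rfl rfl (by
    intro t
    rw [PySem.Dict.getD_foldl_modify_add_one]
    simp [PySem.Dict.getD_empty])]
  rw [zero_add]

-- ---- reordering the triangular triple sum ----

lemma pv_pvS_eq_Ico (a b : Int) (f : Int → Int) :
    pvS a b f = ∑ x ∈ Finset.Ico a b, f x := by
  rw [pvS, ← List.sum_toFinset f (PySem.List.nodup_pyRange_one a b)]
  congr 1
  apply Finset.ext
  intro x
  simp [PySem.List.mem_pyRange_one, Finset.mem_Ico]

lemma pv_swap2 (n : Int) (g : Int → Int → Int) :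
    ∑ x ∈ Finset.Ico (0 : Int) n, ∑ y ∈ Finset.Ico (x + 1) n, g x y
    = ∑ y ∈ Finset.Ico (0 : Int) n, ∑ x ∈ Finset.Ico (0 : Int) y, g x y := by
  have h1 : ∀ x ∈ Finset.Ico (0 : Int) n,
      ∑ y ∈ Finset.Ico (x + 1) n, g x y
      = ∑ y ∈ Finset.Ico (0 : Int) n, if x < y then g x y else 0 := by
    intro x hx
    rw [Finset.mem_Ico] at hx
    rw [← Finset.sum_filter]
    congr 1
    apply Finset.ext
    intro y
    simp only [Finset.mem_Ico, Finset.mem_filter]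
    omega
  rw [Finset.sum_congr rfl h1, Finset.sum_comm]
  apply Finset.sum_congr rfl
  intro y hy
  rw [Finset.mem_Ico] at hy
  rw [← Finset.sum_filter]
  congr 1
  apply Finset.ext
  intro x
  simp only [Finset.mem_Ico, Finset.mem_filter]
  omega

lemma pv_swap3 (n : Int) (F : Int → Int → Int → Int) :
    ∑ i ∈ Finset.Ico (0 : Int) n, ∑ j ∈ Finset.Ico (i + 1) n, ∑ k ∈ Finset.Ico (j + 1) n, F i j k
    = ∑ k ∈ Finset.Ico (0 : Int) n, ∑ j ∈ Finset.Ico (0 : Int) k,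
        ∑ i ∈ Finset.Ico (0 : Int) j, F i j k := by
  rw [pv_swap2 n (fun i j => ∑ k ∈ Finset.Ico (j + 1) n, F i j k)]
  have hcomm : ∀ j ∈ Finset.Ico (0 : Int) n,
      (∑ i ∈ Finset.Ico (0 : Int) j, ∑ k ∈ Finset.Ico (j + 1) n, F i j k)
      = ∑ k ∈ Finset.Ico (j + 1) n, ∑ i ∈ Finset.Ico (0 : Int) j, F i j k :=
    fun j _ => Finset.sum_comm
  rw [Finset.sum_congr rfl hcomm]
  exact pv_swap2 n (fun j k => ∑ i ∈ Finset.Ico (0 : Int) j, F i j k)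

-- ===== VERDICT (by name: the statement is the Claim_ definition above) =====
theorem count_quadruples_spec : Claim_equal_count_quadruples := by
  intro arr _
  show count_quadruples arr = count_quadruples_alt arr
  rw [pv_A_eq, pv_B_eq]
  simp only [pv_pvS_eq_Ico]
  exact pv_swap3 (arr.length : Int) (fun i j k => pvF arr i j k)
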